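-- pv_equiv track=rewrite | github.com/Karen0student/PyCharm | MODUL3/5_zayka.py | bunny
-- ===== SOURCE A (Python) =====
-- def bunny(start, finish, length):
--     jmp_ways = []
--
--     def generate_paths(current_path, rem_jmps):
--         if current_path[-1] == finish and rem_jmps != 0:
--             return
--         if rem_jmps == 0:
--             if current_path[-1] == finish:
--                 jmp_ways.append(current_path.copy())
--             return
--
--         for step in [-3, -1, 1, 3]:
--             next_position = current_path[-1] + step
--             current_path.append(next_position)
--             generate_paths(current_path, rem_jmps - 1)
--             current_path.pop()
--
--     generate_paths([start], length)
--     return jmp_ways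
-- ===== SOURCE B (Python) =====
-- def bunny(start, finish, length):
--     jmp_ways = []
--     stack = [([start], length)]
--     while stack:
--         path, rem = stack.pop()
--         last = path[-1]
--         if last == finish and rem != 0:
--             continue
--         if rem == 0:
--             if last == finish:
--                 jmp_ways.append(path)
--             continue
--         for step in [3, 1, -1, -3]:
--             stack.append((path + [last + step], rem - 1))
--     return jmp_ways
-- ===== Notes on version B (the rewrite author's own statement) =====
-- stated objective: alternative
-- what changed: Replaces the recursive backtracking helper mutating a shared path with an explicit LIFO stack of immutable (path, remaining) states, pushing children in reverse step order so the DFS output order matches.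
import Mathlib
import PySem

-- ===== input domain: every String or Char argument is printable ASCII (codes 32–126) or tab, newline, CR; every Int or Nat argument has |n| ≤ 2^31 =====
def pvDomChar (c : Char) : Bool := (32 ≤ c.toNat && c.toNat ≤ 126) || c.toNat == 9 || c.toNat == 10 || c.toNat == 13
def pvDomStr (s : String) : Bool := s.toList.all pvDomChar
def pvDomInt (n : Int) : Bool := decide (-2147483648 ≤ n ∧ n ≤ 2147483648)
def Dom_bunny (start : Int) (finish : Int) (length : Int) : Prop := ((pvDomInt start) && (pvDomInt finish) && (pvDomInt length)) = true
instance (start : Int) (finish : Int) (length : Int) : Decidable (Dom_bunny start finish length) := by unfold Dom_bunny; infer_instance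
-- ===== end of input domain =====

-- B replaces A's recursive backtracking over a shared mutable path with an explicit LIFO
-- stack of immutable (path, remaining) states; same values, same output order.
-- Both ports keep the current path REVERSED (head = Python's path[-1]) and reverse it once
-- on output; both carry a Nat fuel (= rem.toNat on every reachable call, Python diverges
-- where the fuel guard would fire inside Pre_).

-- ===== PORT A =====
-- recursive helper generate_paths; the for-loop over [-3,-1,1,3] is the foldl
def bunnyGen (finish : Int) (fuel : Nat) (rpath : List Int) (rem : Int) (acc : List (List Int)) : List (List Int) :=
  if rpath.headD 0 = finish ∧ rem ≠ 0 then acc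
  else if rem = 0 then (if rpath.headD 0 = finish then acc ++ [rpath.reverse] else acc)
  else match fuel with
    | 0 => acc  -- fuel guard: unreachable when fuel = rem.toNat and rem > 0; Python diverges when rem < 0
    | f + 1 =>
      [(-3 : Int), -1, 1, 3].foldl
        (fun a step => bunnyGen finish f ((rpath.headD 0 + step) :: rpath) (rem - 1) a) acc
termination_by fuel

def bunny (start : Int) (finish : Int) (length : Int) : List (List Int) :=
  bunnyGen finish length.toNat [start] length []

-- ===== PORT B =====
-- the while-loop; the stack is a List with its head as the top, so the Python
-- 'for step in [3,1,-1,-3]: stack.append(...)' is a foldl consing each child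
def bunnyLoop (finish : Int) (stack : List (List Int × Nat × Int)) (acc : List (List Int)) : List (List Int) :=
  match stack with
  | [] => acc
  | (rpath, fuel, rem) :: rest =>
    let last := rpath.headD 0
    if last = finish ∧ rem ≠ 0 then bunnyLoop finish rest acc
    else if rem = 0 then
      bunnyLoop finish rest (if last = finish then acc ++ [rpath.reverse] else acc)
    else match fuel with
      | 0 => bunnyLoop finish rest acc  -- fuel guard, as in port A
      | f + 1 =>
        bunnyLoop finish
          ([(3 : Int), 1, -1, -3].foldl (fun st step => ((last + step) :: rpath, f, rem - 1) :: st) rest)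
          acc
termination_by (stack.map (fun e => 5 ^ e.2.1)).sum
decreasing_by
  all_goals simp [pow_succ]
  all_goals (have h : (5:Nat) ^ f ≥ 1 := Nat.one_le_pow _ _ (by omega); omega)

def bunny_alt (start : Int) (finish : Int) (length : Int) : List (List Int) :=
  bunnyLoop finish [([start], length.toNat, length)] []

-- ===== PRECONDITION & SPEC =====
-- Pre_ excludes exactly the inputs where Python A raises RecursionError: negative length
-- with start ≠ finish (the recursion never reaches rem_jmps == 0).
def Pre_bunny (start : Int) (finish : Int) (length : Int) : Prop := 0 ≤ length ∨ start = finish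
instance (start : Int) (finish : Int) (length : Int) : Decidable (Pre_bunny start finish length) := by unfold Pre_bunny; infer_instance
def pvWitness_bunny : Int × Int × Int := (0, 2, 4)

def Spec_bunny (start : Int) (finish : Int) (length : Int) (out : List (List Int)) : Prop := out = bunny_alt start finish length
instance (start : Int) (finish : Int) (length : Int) (out : List (List Int)) : Decidable (Spec_bunny start finish length out) := by unfold Spec_bunny; infer_instance

-- ===== CLAIM (what is proved, stated in full; the proofs are below) =====
def Claim_equal_bunny : Prop := ∀ (start : Int) (finish : Int) (length : Int), Dom_bunny start finish length → Pre_bunny start finish length → Spec_bunny start finish length (bunny start finish length)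

-- ===== LEMMAS AND PROOFS =====

-- processing one stack state is running A's recursive generator on it
theorem bunnyLoop_state (finish : Int) (fuel : Nat) :
    ∀ (rpath : List Int) (rem : Int) (rest : List (List Int × Nat × Int)) (acc : List (List Int)),
    bunnyLoop finish ((rpath, fuel, rem) :: rest) acc
      = bunnyLoop finish rest (bunnyGen finish fuel rpath rem acc) := by
  induction fuel with
  | zero =>
    intro rpath rem rest acc
    rw [bunnyLoop, bunnyGen]
    split_ifs <;> rfl
  | succ f ih =>
    intro rpath rem rest acc
    rw [bunnyLoop, bunnyGen]
    split_ifs with h1 h2 h3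
    · rfl
    · rfl
    · rfl
    · simp only [List.foldl_cons, List.foldl_nil]
      rw [ih, ih, ih, ih]

theorem bunnyLoop_nil (finish : Int) (acc : List (List Int)) :
    bunnyLoop finish [] acc = acc := by rw [bunnyLoop]

-- ===== VERDICT (by name: the statement is the Claim_ definition above) =====
theorem bunny_spec : Claim_equal_bunny := by
  intro start finish length _ _
  unfold Spec_bunny bunny bunny_alt
  rw [bunnyLoop_state, bunnyLoop_nil]
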